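-- pv_equiv track=rewrite | github.com/Gyumin-Kimm/python_practice_program | programmers_solution.py | solution
-- ===== SOURCE A (Python) =====
-- def weekday_flag(day):  # 주말여부 판단
--     if day >= 5:
--         return 1  # 주말 = 1
--     return 0  # 평일 0
--
-- def solution(day, k):
--     answer = []
--     days = [0, 31, 28, 31, 30, 31, 30, 31, 31, 30, 31, 30]
--     """
--     1 / 6
--     2 / (6+1) % 7 = 0
--     3 / (6+2) % 7 = 1
--     25 / (6+24) % 7 = 2
--     """
--
--     for i in range(1, len(days) + 1):
--         answer.append(weekday_flag((day + k + sum(days[:i]) - 1) % 7))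
--
--     return answer
-- ===== SOURCE B (Python) =====
-- def solution(day, k):
--     days = [0, 31, 28, 31, 30, 31, 30, 31, 31, 30, 31, 30]
--     answer = []
--     acc = 0
--     for d in days:
--         acc += d
--         answer.append(1 if (day + k + acc - 1) % 7 >= 5 else 0)
--     return answer
-- ===== Notes on version B (the rewrite author's own statement) =====
-- stated objective: simpler
-- what changed: Replaces the per-month sum(days[:i]) rescan (12 nested prefix-sum passes plus a helper function) with a single pass that threads a running accumulator over the month lengths and inlines the weekday flag as a conditional expression.
import Mathlib
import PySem

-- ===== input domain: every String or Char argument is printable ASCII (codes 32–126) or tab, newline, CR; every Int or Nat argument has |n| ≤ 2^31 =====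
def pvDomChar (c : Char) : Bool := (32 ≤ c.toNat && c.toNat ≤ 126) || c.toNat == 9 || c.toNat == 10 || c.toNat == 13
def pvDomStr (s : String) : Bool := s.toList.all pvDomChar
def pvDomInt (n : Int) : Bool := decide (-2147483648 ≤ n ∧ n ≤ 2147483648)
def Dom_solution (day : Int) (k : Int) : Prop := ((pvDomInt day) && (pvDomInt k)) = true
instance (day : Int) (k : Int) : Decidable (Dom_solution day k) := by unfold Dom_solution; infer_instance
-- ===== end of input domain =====

-- B replaces A's nested sum(days[:i]) prefix rescans with one running-accumulator pass (objective: simpler).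

-- ===== PORT A =====
def weekdayFlag (day : Int) : Int := if day ≥ 5 then 1 else 0

def solution (day : Int) (k : Int) : List Int :=
  let days : List Int := [0, 31, 28, 31, 30, 31, 30, 31, 31, 30, 31, 30]
  (PySem.List.pyRange 1 ((days.length : Int) + 1) 1).foldl
    (fun answer i =>
      answer ++ [weekdayFlag (PySem.Int.mod (day + k + (PySem.List.slice days none (some i)).sum - 1) 7)])
    []

-- ===== PORT B =====
def solution_alt (day : Int) (k : Int) : List Int :=
  let days : List Int := [0, 31, 28, 31, 30, 31, 30, 31, 31, 30, 31, 30]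
  (days.foldl
    (fun (st : Int × List Int) d =>
      let acc := st.1 + d
      (acc, st.2 ++ [if PySem.Int.mod (day + k + acc - 1) 7 ≥ 5 then (1 : Int) else 0]))
    (0, [])).2

-- ===== PRECONDITION & SPEC =====
def Spec_solution (day : Int) (k : Int) (out : List Int) : Prop := out = solution_alt day k
instance (day : Int) (k : Int) (out : List Int) : Decidable (Spec_solution day k out) := by unfold Spec_solution; infer_instance

-- ===== CLAIM (what is proved, stated in full; the proofs are below) =====
def Claim_equal_solution : Prop := ∀ (day : Int) (k : Int), Dom_solution day k → Spec_solution day k (solution day k)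

-- ===== LEMMAS AND PROOFS =====

-- ===== VERDICT (by name: the statement is the Claim_ definition above) =====
theorem solution_spec : Claim_equal_solution := by
  intro day k _
  unfold Spec_solution solution solution_alt
  simp [PySem.List.pyRange, PySem.List.slice, PySem.List.clampIdx, PySem.Int.mod, weekdayFlag,
    List.range_succ, List.foldl]
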